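-- pv_equiv track=rewrite | github.com/lobstercove/lichen | sdk/python/lichen/lichenid.py | _has_valid_name_characters
-- ===== SOURCE A (Python) =====
-- def _has_valid_name_characters(label: str) -> bool:
--     return (
--         bool(label)
--         and not label.startswith("-")
--         and not label.endswith("-")
--         and "--" not in label
--         and all(ch.isdigit() or ("a" <= ch <= "z") or ch == "-" for ch in label)
--     )
-- ===== SOURCE B (Python) =====
-- def _has_valid_name_characters(label: str) -> bool:
--     # One-pass automaton: prev_dash means "a dash may not appear here"
--     # (true at the start and right after a dash).
--     prev_dash = True
--     for ch in label:
--         if ch == "-":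
--             if prev_dash:
--                 return False
--             prev_dash = True
--         elif ch.isdigit() or "a" <= ch <= "z":
--             prev_dash = False
--         else:
--             return False
--     return not prev_dash
-- ===== Notes on version B (the rewrite author's own statement) =====
-- stated objective: alternative
-- what changed: Replaced A's four separate string scans (startswith, endswith, '--' substring search, all-chars test) by a single left-to-right pass driven by one boolean state (whether a dash is currently forbidden), returning early on any violation.
import Mathlib
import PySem

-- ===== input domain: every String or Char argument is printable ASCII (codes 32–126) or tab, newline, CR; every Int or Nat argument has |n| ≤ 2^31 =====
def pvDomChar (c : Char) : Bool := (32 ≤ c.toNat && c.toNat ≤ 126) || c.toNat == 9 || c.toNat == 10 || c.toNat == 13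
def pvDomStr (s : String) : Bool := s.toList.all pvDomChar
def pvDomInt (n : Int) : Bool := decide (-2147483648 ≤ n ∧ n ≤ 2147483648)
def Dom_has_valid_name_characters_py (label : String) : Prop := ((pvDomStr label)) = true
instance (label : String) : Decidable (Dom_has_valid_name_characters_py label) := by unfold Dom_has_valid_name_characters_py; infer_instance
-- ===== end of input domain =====

-- B replaces A's four separate scans (startswith/endswith/"--" search/all) by one
-- left-to-right pass with a single boolean state; objective: alternative decomposition.

-- ===== PORT A =====
def has_valid_name_characters_py (label : String) : Bool :=
  !label.toList.isEmpty
  && !PySem.Str.startswith label "-"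
  && !PySem.Str.endswith label "-"
  && !PySem.Str.isIn "--" label
  && label.toList.all (fun ch =>
       PySem.Chars.isdigit ch || (decide ('a' ≤ ch) && decide (ch ≤ 'z')) || ch == '-')

-- ===== PORT B =====
-- the loop of Source B: prev = "a dash may not appear here"; early return = false
def pvGoB : Bool → List Char → Bool
  | prev, [] => !prev
  | prev, ch :: rest =>
    if ch == '-' then
      if prev then false else pvGoB true rest
    else if PySem.Chars.isdigit ch || (decide ('a' ≤ ch) && decide (ch ≤ 'z')) then
      pvGoB false rest
    else false

def has_valid_name_characters_py_alt (label : String) : Bool :=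
  pvGoB true label.toList

-- ===== PRECONDITION & SPEC =====
def Spec_has_valid_name_characters_py (label : String) (out : Bool) : Prop := out = has_valid_name_characters_py_alt label
instance (label : String) (out : Bool) : Decidable (Spec_has_valid_name_characters_py label out) := by unfold Spec_has_valid_name_characters_py; infer_instance

-- ===== CLAIM (what is proved, stated in full; the proofs are below) =====
def Claim_equal_has_valid_name_characters_py : Prop := ∀ (label : String), Dom_has_valid_name_characters_py label → Spec_has_valid_name_characters_py label (has_valid_name_characters_py label)

-- ===== LEMMAS AND PROOFS =====

def pvOkB (ch : Char) : Bool :=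
  PySem.Chars.isdigit ch || (decide ('a' ≤ ch) && decide (ch ≤ 'z'))

-- the invariant reached when a dash may appear (prev = false)
def pvQ (l : List Char) : Prop :=
  (∀ ch ∈ l, (pvOkB ch || ch == '-') = true) ∧ ¬(['-', '-'] <:+: l) ∧ ¬(['-'] <:+ l)

lemma pvGoB_iff (l : List Char) :
    (pvGoB false l = true ↔ pvQ l) ∧
    (pvGoB true l = true ↔ (pvQ l ∧ ¬(['-'] <+: l) ∧ l ≠ [])) := by
  induction l with
  | nil => simp [pvGoB, pvQ]
  | cons c r ih =>
    obtain ⟨ih0, ih1⟩ := ih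
    by_cases hc : c = '-'
    · subst hc
      have h1 : (['-', '-'] : List Char) <:+: ('-' :: r) ↔ (['-'] <+: r ∨ ['-', '-'] <:+: r) := by
        rw [List.infix_cons_iff, List.cons_prefix_cons]; simp
      have h2 : (['-'] : List Char) <:+ ('-' :: r) ↔ (r = [] ∨ ['-'] <:+ r) := by
        rw [List.suffix_cons_iff]
        constructor
        · rintro (h | h); · exact Or.inl (by injection h.symm)
          · exact Or.inr h
        · rintro (rfl | h); · exact Or.inl rfl
          · exact Or.inr h
      have hall : (∀ ch ∈ ('-' :: r), (pvOkB ch || ch == '-') = true) ↔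
          (∀ ch ∈ r, (pvOkB ch || ch == '-') = true) := by
        constructor
        · exact fun h ch hm => h ch (List.mem_cons_of_mem _ hm)
        · intro h ch hm
          rcases List.mem_cons.mp hm with rfl | hm
          · decide
          · exact h ch hm
      have hq : pvQ ('-' :: r) ↔ (pvQ r ∧ ¬(['-'] <+: r) ∧ r ≠ []) := by
        unfold pvQ
        rw [hall, h1, h2]
        push_neg
        tauto
      refine ⟨by simp [pvGoB, hq, ih1], by simp [pvGoB, hq]⟩
    · by_cases hok : pvOkB c = true
      · have h1 : (['-', '-'] : List Char) <:+: (c :: r) ↔ ['-', '-'] <:+: r := by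
          rw [List.infix_cons_iff, List.cons_prefix_cons]
          simp [Ne.symm hc]
        have h2 : (['-'] : List Char) <:+ (c :: r) ↔ ['-'] <:+ r := by
          rw [List.suffix_cons_iff]
          constructor
          · rintro (h | h)
            · exact absurd (by injection h.symm : c = '-') hc
            · exact h
          · exact Or.inr
        have hall : (∀ ch ∈ (c :: r), (pvOkB ch || ch == '-') = true) ↔
            (∀ ch ∈ r, (pvOkB ch || ch == '-') = true) := by
          constructor
          · exact fun h ch hm => h ch (List.mem_cons_of_mem _ hm)
          · intro h ch hm
            rcases List.mem_cons.mp hm with rfl | hm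
            · simp [hok]
            · exact h ch hm
        have hq : pvQ (c :: r) ↔ pvQ r := by
          unfold pvQ; rw [hall, h1, h2]
        have hgo : ∀ p : Bool, pvGoB p (c :: r) = pvGoB false r := by
          intro p
          simp only [pvGoB, pvOkB] at hok ⊢
          rw [if_neg (by simp [hc]), if_pos hok]
        refine ⟨by rw [hgo, ih0, hq], ?_⟩
        rw [hgo, ih0, hq]
        simp [List.cons_prefix_cons, Ne.symm hc]
      · have hq : ¬ pvQ (c :: r) := by
          rintro ⟨hall, -, -⟩
          have := hall c (List.mem_cons_self ..)
          simp [hok, hc] at this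
        have hgo : ∀ p : Bool, pvGoB p (c :: r) = false := by
          intro p
          simp only [pvGoB, pvOkB] at hok ⊢
          rw [if_neg (by simp [hc]), if_neg hok]
        constructor <;> rw [hgo] <;> simp [hq]

lemma portA_iff (label : String) :
    has_valid_name_characters_py label = true ↔
      (pvQ label.toList ∧ ¬(['-'] <+: label.toList) ∧ label.toList ≠ []) := by
  have hsw : PySem.Str.startswith label "-" = true ↔ ['-'] <+: label.toList := by
    rw [PySem.Str.startswith_eq, PySem.Chars.startswith_iff]; rfl
  have hew : PySem.Str.endswith label "-" = true ↔ ['-'] <:+ label.toList := by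
    rw [PySem.Str.endswith_eq, PySem.Chars.endswith_iff]; rfl
  have hin : PySem.Str.isIn "--" label = true ↔ ['-', '-'] <:+: label.toList := by
    rw [PySem.Str.isIn_iff_infix]; rfl
  simp only [has_valid_name_characters_py, pvQ, pvOkB, Bool.and_eq_true, Bool.not_eq_true',
    List.all_eq_true, ← Bool.not_eq_true,
    hsw, hew, hin, List.isEmpty_iff]
  tauto

-- ===== VERDICT (by name: the statement is the Claim_ definition above) =====
theorem has_valid_name_characters_py_spec : Claim_equal_has_valid_name_characters_py := by
  intro label _
  unfold Spec_has_valid_name_characters_py has_valid_name_characters_py_alt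
  rw [Bool.eq_iff_iff, portA_iff, (pvGoB_iff label.toList).2]
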